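-- pv_equiv track=rewrite | github.com/pacmanninja998/Python-Learning | karen's Projects/Numbers/Number Names.py | spell_chunks
-- ===== SOURCE A (Python) =====
-- def get_ones(num):
--     ones = {0: '', 1: 'one', 2: 'two', 3: 'three', 4: 'four',
--             5: 'five', 6: 'six', 7: 'seven', 8: 'eight', 9: 'nine'}
--     return ones[num]
--
-- def get_teens(num):
--     teens = {10: 'ten', 11: 'eleven', 12: 'twelve', 13: 'thirteen', 14: 'fourteen',
--              15: 'fifteen', 16: 'sixteen', 17: 'seventeen', 18: 'eighteen', 19: 'nineteen'}
--     return teens[num]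
--
-- def get_tens(num):
--     tens = {2: 'twenty', 3: 'thirty', 4: 'forty', 5: 'fifty',
--             6: 'sixty', 7: 'seventy', 8: 'eighty', 9: 'ninety'}
--     return tens[num]
--
-- def spell_chunks(number):
--     if number == 0:
--         return ''
--     elif number < 10:
--         return get_ones(number)
--     elif number < 20:
--         return get_teens(number)
--     elif number < 100:
--         tens, ones = divmod(number, 10)
--         return get_tens(tens) + ('-' + get_ones(ones) if ones > 0 else '')
--     else:
--         hundreds, rest = divmod(number, 100)
--         result = get_ones(hundreds) + ' hundred'
--         if rest > 0:
--             result += ' and ' + spell_chunks(rest)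
--         return result
-- ===== SOURCE B (Python) =====
-- ONES = ['', 'one', 'two', 'three', 'four', 'five', 'six', 'seven', 'eight', 'nine']
-- TEENS = ['ten', 'eleven', 'twelve', 'thirteen', 'fourteen', 'fifteen', 'sixteen',
--          'seventeen', 'eighteen', 'nineteen']
-- TENS = ['', '', 'twenty', 'thirty', 'forty', 'fifty', 'sixty', 'seventy', 'eighty', 'ninety']
--
-- def spell_chunks(number):
--     # positional: read the three decimal digit characters of the zero-padded string
--     d = str(number).zfill(3)
--     h, t, o = int(d[-3]), int(d[-2]), int(d[-1])
--     if t == 1: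
--         tail = TEENS[o]
--     elif t >= 2:
--         tail = TENS[t] + ('-' + ONES[o] if o else '')
--     else:
--         tail = ONES[o]
--     if h and tail:
--         return ONES[h] + ' hundred and ' + tail
--     if h:
--         return ONES[h] + ' hundred'
--     return tail
-- ===== Notes on version B (the rewrite author's own statement) =====
-- stated objective: alternative
-- what changed: Replaces A's value-threshold divmod cascade with self-recursion on the remainder by a digit-string positional pass: the number is rendered as a zero-padded 3-digit string, the three digit characters are read off, and hundreds/tens/teens/ones are assembled positionally (teens indexed by the ones digit) with no recursion and no arithmetic splitting.
-- outside the precondition, e.g. on spell_chunks(1000): A raises KeyError, B returns ''; on spell_chunks(-1): A raises KeyError, B raises ValueError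
import Mathlib
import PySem

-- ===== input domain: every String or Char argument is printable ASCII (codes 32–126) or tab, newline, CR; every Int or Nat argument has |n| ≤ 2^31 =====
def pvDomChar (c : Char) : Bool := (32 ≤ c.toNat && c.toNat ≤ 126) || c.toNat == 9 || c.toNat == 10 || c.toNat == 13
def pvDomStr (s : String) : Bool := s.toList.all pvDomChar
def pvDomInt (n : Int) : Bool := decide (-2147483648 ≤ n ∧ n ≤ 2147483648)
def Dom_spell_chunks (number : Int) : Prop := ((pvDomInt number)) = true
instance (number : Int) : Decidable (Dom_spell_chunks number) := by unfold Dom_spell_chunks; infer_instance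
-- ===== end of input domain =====

-- B replaces A's value-threshold divmod cascade with self-recursion by a digit-string positional
-- pass over str(number).zfill(3) (objective: alternative); Pre_ restricts to 0..999 where A returns
-- normally (KeyError outside).

-- ===== PORT A =====
def get_ones (num : Int) : String :=
  (PySem.Dict.get? (PySem.Dict.ofList [((0:Int), ""), (1, "one"), (2, "two"), (3, "three"), (4, "four"),
    (5, "five"), (6, "six"), (7, "seven"), (8, "eight"), (9, "nine")]) num).getD ""

def get_teens (num : Int) : String :=
  (PySem.Dict.get? (PySem.Dict.ofList [((10:Int), "ten"), (11, "eleven"), (12, "twelve"), (13, "thirteen"),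
    (14, "fourteen"), (15, "fifteen"), (16, "sixteen"), (17, "seventeen"), (18, "eighteen"),
    (19, "nineteen")]) num).getD ""

def get_tens (num : Int) : String :=
  (PySem.Dict.get? (PySem.Dict.ofList [((2:Int), "twenty"), (3, "thirty"), (4, "forty"), (5, "fifty"),
    (6, "sixty"), (7, "seventy"), (8, "eighty"), (9, "ninety")]) num).getD ""

-- fuel makes A's self-recursion structural; number.toNat + 1 always suffices (the recursive
-- argument rest = number % 100 satisfies rest < number when the else-branch is reached with number ≥ 100)
def spellGo : Nat → Int → String
  | 0, _ => ""
  | fuel + 1, number =>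
    if number == 0 then ""
    else if number < 10 then get_ones number
    else if number < 20 then get_teens number
    else if number < 100 then
      let tens := PySem.Int.floordiv number 10
      let ones := PySem.Int.mod number 10
      get_tens tens ++ (if ones > 0 then "-" ++ get_ones ones else "")
    else
      let hundreds := PySem.Int.floordiv number 100
      let rest := PySem.Int.mod number 100
      let result := get_ones hundreds ++ " hundred"
      if rest > 0 then result ++ " and " ++ spellGo fuel rest else result

def spell_chunks (number : Int) : String := spellGo (number.toNat + 1) number

-- ===== PORT B =====
def pvONES : List String :=
  ["", "one", "two", "three", "four", "five", "six", "seven", "eight", "nine"]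
def pvTEENS : List String :=
  ["ten", "eleven", "twelve", "thirteen", "fourteen", "fifteen", "sixteen",
   "seventeen", "eighteen", "nineteen"]
def pvTENS : List String :=
  ["", "", "twenty", "thirty", "forty", "fifty", "sixty", "seventy", "eighty", "ninety"]

-- int(d[i]) for one digit character: Str.pyGet? then Int.ofChars? on the single char
-- (.getD defaults are never hit on Pre_: d has ≥ 3 digit characters there)
def pvDigit (d : List Char) (i : Int) : Int :=
  (PySem.Int.ofChars? [((PySem.List.pyGet? d i).getD '0')]).getD 0

def spell_chunks_alt (number : Int) : String :=
  let d := PySem.Chars.zfill (PySem.Int.toChars number) 3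
  let h := pvDigit d (-3)
  let t := pvDigit d (-2)
  let o := pvDigit d (-1)
  let tail :=
    if t == 1 then (PySem.List.pyGet? pvTEENS o).getD ""
    else if t ≥ 2 then
      (PySem.List.pyGet? pvTENS t).getD "" ++
        (if o ≠ 0 then "-" ++ (PySem.List.pyGet? pvONES o).getD "" else "")
    else (PySem.List.pyGet? pvONES o).getD ""
  if h ≠ 0 ∧ tail ≠ "" then (PySem.List.pyGet? pvONES h).getD "" ++ " hundred and " ++ tail
  else if h ≠ 0 then (PySem.List.pyGet? pvONES h).getD "" ++ " hundred"
  else tail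

-- ===== PRECONDITION & SPEC =====
-- A raises KeyError for negative numbers (get_ones) and for numbers ≥ 1000 (get_ones on hundreds ≥ 10)
def Pre_spell_chunks (number : Int) : Prop := 0 ≤ number ∧ number < 1000
instance (number : Int) : Decidable (Pre_spell_chunks number) := by unfold Pre_spell_chunks; infer_instance
def pvWitness_spell_chunks : Int := (342)

def Spec_spell_chunks (number : Int) (out : String) : Prop := out = spell_chunks_alt number
instance (number : Int) (out : String) : Decidable (Spec_spell_chunks number out) := by unfold Spec_spell_chunks; infer_instance

-- ===== CLAIM =====
def Claim_equal_spell_chunks : Prop := ∀ (number : Int), Dom_spell_chunks number → Pre_spell_chunks number → Spec_spell_chunks number (spell_chunks number)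

-- ===== LEMMAS AND PROOFS =====
set_option maxRecDepth 4000 in
set_option maxHeartbeats 4000000 in
lemma key_chunk_0 : ∀ n : Nat, n < 100 → spell_chunks ((0*100+n : Nat) : Int) = spell_chunks_alt ((0*100+n : Nat) : Int) := by decide

set_option maxRecDepth 4000 in
set_option maxHeartbeats 4000000 in
lemma key_chunk_1 : ∀ n : Nat, n < 100 → spell_chunks ((1*100+n : Nat) : Int) = spell_chunks_alt ((1*100+n : Nat) : Int) := by decide

set_option maxRecDepth 4000 in
set_option maxHeartbeats 4000000 in
lemma key_chunk_2 : ∀ n : Nat, n < 100 → spell_chunks ((2*100+n : Nat) : Int) = spell_chunks_alt ((2*100+n : Nat) : Int) := by decide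

set_option maxRecDepth 4000 in
set_option maxHeartbeats 4000000 in
lemma key_chunk_3 : ∀ n : Nat, n < 100 → spell_chunks ((3*100+n : Nat) : Int) = spell_chunks_alt ((3*100+n : Nat) : Int) := by decide

set_option maxRecDepth 4000 in
set_option maxHeartbeats 4000000 in
lemma key_chunk_4 : ∀ n : Nat, n < 100 → spell_chunks ((4*100+n : Nat) : Int) = spell_chunks_alt ((4*100+n : Nat) : Int) := by decide

set_option maxRecDepth 4000 in
set_option maxHeartbeats 4000000 in
lemma key_chunk_5 : ∀ n : Nat, n < 100 → spell_chunks ((5*100+n : Nat) : Int) = spell_chunks_alt ((5*100+n : Nat) : Int) := by decide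

set_option maxRecDepth 4000 in
set_option maxHeartbeats 4000000 in
lemma key_chunk_6 : ∀ n : Nat, n < 100 → spell_chunks ((6*100+n : Nat) : Int) = spell_chunks_alt ((6*100+n : Nat) : Int) := by decide

set_option maxRecDepth 4000 in
set_option maxHeartbeats 4000000 in
lemma key_chunk_7 : ∀ n : Nat, n < 100 → spell_chunks ((7*100+n : Nat) : Int) = spell_chunks_alt ((7*100+n : Nat) : Int) := by decide

set_option maxRecDepth 4000 in
set_option maxHeartbeats 4000000 in
lemma key_chunk_8 : ∀ n : Nat, n < 100 → spell_chunks ((8*100+n : Nat) : Int) = spell_chunks_alt ((8*100+n : Nat) : Int) := by decide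

set_option maxRecDepth 4000 in
set_option maxHeartbeats 4000000 in
lemma key_chunk_9 : ∀ n : Nat, n < 100 → spell_chunks ((9*100+n : Nat) : Int) = spell_chunks_alt ((9*100+n : Nat) : Int) := by decide

lemma key_lemma (n : Nat) (h : n < 1000) : spell_chunks (n : Int) = spell_chunks_alt (n : Int) := by
  obtain ⟨q, r, hq, hr, rfl⟩ : ∃ q r, q < 10 ∧ r < 100 ∧ n = q * 100 + r :=
    ⟨n / 100, n % 100, by omega, by omega, by omega⟩
  interval_cases q
  · exact key_chunk_0 r hr
  · exact key_chunk_1 r hr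
  · exact key_chunk_2 r hr
  · exact key_chunk_3 r hr
  · exact key_chunk_4 r hr
  · exact key_chunk_5 r hr
  · exact key_chunk_6 r hr
  · exact key_chunk_7 r hr
  · exact key_chunk_8 r hr
  · exact key_chunk_9 r hr

-- ===== VERDICT =====
theorem spell_chunks_spec : Claim_equal_spell_chunks := by
  intro number _ hpre
  obtain ⟨h0, h1⟩ := hpre
  unfold Spec_spell_chunks
  lift number to Nat using h0 with n
  exact key_lemma n (by exact_mod_cast h1)
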